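-- pv_equiv track=rewrite | github.com/marishiten4/easy_renamer2 | easy_renamer/src/core/metadata.py | parse_prompt_keywords
-- ===== SOURCE A (Python) =====
-- def parse_prompt_keywords(prompt, keyword_list):
--     """
--     Parse prompt text for relevant keywords
--
--     Args:
--         prompt: Prompt text
--         keyword_list: List of keywords to search for
--
--     Returns:
--         List of found keywords
--     """
--     if not prompt or not keyword_list:
--         return []
--
--     prompt_lower = prompt.lower()
--     found_keywords = []
--
--     for keyword in keyword_list:
--         if keyword.lower() in prompt_lower:
--             found_keywords.append(keyword)
--
--     return found_keywords
-- ===== SOURCE B (Python) =====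
-- def parse_prompt_keywords(prompt, keyword_list):
--     if not prompt or not keyword_list:
--         return []
--     p = prompt.lower()
--     n = len(p)
--     lengths = {len(kw.lower()) for kw in keyword_list}
--     present = set()
--     for m in lengths:
--         for i in range(n - m + 1):
--             present.add(p[i:i + m])
--     return [kw for kw in keyword_list if kw.lower() in present]
-- ===== Notes on version B (the rewrite author's own statement) =====
-- stated objective: faster
-- what changed: Instead of running a substring search over the prompt per keyword, B indexes the lowercased prompt once per distinct keyword length (a hash set of all windows of those lengths) and then filters the keyword list with one O(1) set-membership test per keyword.
import Mathlib
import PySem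

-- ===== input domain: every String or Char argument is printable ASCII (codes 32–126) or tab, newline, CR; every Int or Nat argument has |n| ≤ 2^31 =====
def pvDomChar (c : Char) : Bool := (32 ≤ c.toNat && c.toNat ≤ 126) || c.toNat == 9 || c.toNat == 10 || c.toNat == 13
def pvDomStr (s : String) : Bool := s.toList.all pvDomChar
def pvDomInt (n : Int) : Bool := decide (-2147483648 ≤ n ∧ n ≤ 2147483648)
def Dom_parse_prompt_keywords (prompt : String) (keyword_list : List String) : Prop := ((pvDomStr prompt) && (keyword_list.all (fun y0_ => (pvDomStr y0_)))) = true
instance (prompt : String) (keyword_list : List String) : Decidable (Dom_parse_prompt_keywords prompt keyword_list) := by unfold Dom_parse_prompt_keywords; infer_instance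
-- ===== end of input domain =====

-- B replaces the per-keyword substring search of A with a one-time substring index of the
-- lowercased prompt (a set of all windows of the needed lengths) filtered by set membership;
-- objective: alternative algorithm, same results.

-- ===== PORT A =====
def parse_prompt_keywords (prompt : String) (keyword_list : List String) : List String :=
  if prompt.toList = [] ∨ keyword_list = [] then []
  else
    let prompt_lower := PySem.Str.lower prompt
    keyword_list.foldl
      (fun found_keywords keyword =>
        if PySem.Str.isIn (PySem.Str.lower keyword) prompt_lower then
          found_keywords ++ [keyword]
        else found_keywords) []

-- ===== PORT B =====
def parse_prompt_keywords_alt (prompt : String) (keyword_list : List String) : List String :=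
  if prompt.toList = [] ∨ keyword_list = [] then []
  else
    let p := PySem.Str.lower prompt
    let n := PySem.Str.len p
    let lengths : PySem.Set Int :=
      PySem.Set.ofList (keyword_list.map (fun kw => PySem.Str.len (PySem.Str.lower kw)))
    let present : PySem.Set String :=
      lengths.foldl
        (fun acc m =>
          (PySem.List.pyRange 0 (n - m + 1)).foldl
            (fun acc2 i => PySem.Set.add acc2 (PySem.Str.slice p (some i) (some (i + m)))) acc)
        PySem.Set.empty
    keyword_list.filter (fun kw => present.contains (PySem.Str.lower kw))

-- ===== PRECONDITION & SPEC =====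
def Spec_parse_prompt_keywords (prompt : String) (keyword_list : List String) (out : List String) : Prop := out = parse_prompt_keywords_alt prompt keyword_list
instance (prompt : String) (keyword_list : List String) (out : List String) : Decidable (Spec_parse_prompt_keywords prompt keyword_list out) := by unfold Spec_parse_prompt_keywords; infer_instance

-- ===== CLAIM (what is proved, stated in full; the proofs are below) =====
def Claim_equal_parse_prompt_keywords : Prop := ∀ (prompt : String) (keyword_list : List String), Dom_parse_prompt_keywords prompt keyword_list → Spec_parse_prompt_keywords prompt keyword_list (parse_prompt_keywords prompt keyword_list)

-- ===== LEMMAS AND PROOFS =====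

-- membership in a fold that only Set.adds
theorem mem_foldl_set_add {α β : Type} [BEq α] [LawfulBEq α] (l : List β) (f : β → α)
    (s : PySem.Set α) (y : α) :
    y ∈ l.foldl (fun acc x => PySem.Set.add acc (f x)) s ↔ y ∈ s ∨ ∃ x ∈ l, y = f x := by
  induction l generalizing s with
  | nil => simp
  | cons h t ih =>
    simp only [List.foldl_cons, ih, PySem.Set.mem_add, List.mem_cons]
    constructor
    · rintro ((hs | he) | ⟨x, hx, hy⟩)
      · exact Or.inl hs
      · exact Or.inr ⟨h, Or.inl rfl, he⟩
      · exact Or.inr ⟨x, Or.inr hx, hy⟩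
    · rintro (hs | ⟨x, (rfl | hx), hy⟩)
      · exact Or.inl (Or.inl hs)
      · exact Or.inl (Or.inr hy)
      · exact Or.inr ⟨x, hx, hy⟩

-- membership in the nested fold building the window index
theorem mem_foldl_foldl_set_add {α β γ : Type} [BEq α] [LawfulBEq α]
    (l : List β) (h : β → List γ) (f : β → γ → α) (s : PySem.Set α) (y : α) :
    y ∈ l.foldl (fun acc m => (h m).foldl (fun acc2 i => PySem.Set.add acc2 (f m i)) acc) s ↔
      y ∈ s ∨ ∃ m ∈ l, ∃ i ∈ h m, y = f m i := by
  induction l generalizing s with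
  | nil => simp
  | cons b t ih =>
    simp only [List.foldl_cons, ih, mem_foldl_set_add, List.mem_cons]
    constructor
    · rintro ((hs | ⟨i, hi, hy⟩) | ⟨m, hm, i, hi, hy⟩)
      · exact Or.inl hs
      · exact Or.inr ⟨b, Or.inl rfl, i, hi, hy⟩
      · exact Or.inr ⟨m, Or.inr hm, i, hi, hy⟩
    · rintro (hs | ⟨m, (rfl | hm), i, hi, hy⟩)
      · exact Or.inl (Or.inl hs)
      · exact Or.inl (Or.inr ⟨i, hi, hy⟩)
      · exact Or.inr ⟨m, hm, i, hi, hy⟩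

-- a keyword's lower-case form is a window of the prompt iff it is an infix
theorem window_iff_infix (kw p : List Char) :
    (∃ i : Int, 0 ≤ i ∧ i < (p.length : Int) - (kw.length : Int) + 1 ∧
        kw = PySem.List.slice p (some i) (some (i + (kw.length : Int)))) ↔ kw <:+: p := by
  constructor
  · rintro ⟨i, hi0, _, hkw⟩
    rw [hkw, PySem.List.slice_toNat p hi0 (by omega)]
    have : (i + (kw.length : Int)).toNat - i.toNat = kw.length := by omega
    rw [this]
    exact ((List.take_prefix _ _).isInfix).trans ((List.drop_suffix _ _).isInfix)
  · rintro ⟨t, u, rfl⟩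
    refine ⟨(t.length : Int), by omega, by simp; omega, ?_⟩
    have := PySem.List.slice_natCast_add (t ++ kw ++ u) t.length kw.length
    rw [this]
    rw [List.append_assoc, List.drop_left, List.take_left]

-- the per-keyword tests of A and B agree
theorem contains_eq_isIn (prompt : String) (keyword_list : List String) (kw : String)
    (hkw : kw ∈ keyword_list) :
    PySem.Set.contains
      ((PySem.Set.ofList (keyword_list.map (fun k => PySem.Str.len (PySem.Str.lower k)))).foldl
        (fun acc m =>
          (PySem.List.pyRange 0 (PySem.Str.len (PySem.Str.lower prompt) - m + 1)).foldl
            (fun acc2 i =>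
              PySem.Set.add acc2 (PySem.Str.slice (PySem.Str.lower prompt) (some i) (some (i + m)))) acc)
        PySem.Set.empty)
      (PySem.Str.lower kw)
      = PySem.Str.isIn (PySem.Str.lower kw) (PySem.Str.lower prompt) := by
  set pl := PySem.Str.lower prompt with hpl
  set kl := PySem.Str.lower kw with hkl
  have hmemL : PySem.Str.len kl ∈
      PySem.Set.ofList (keyword_list.map (fun k => PySem.Str.len (PySem.Str.lower k))) := by
    rw [PySem.Set.mem_ofList]
    exact List.mem_map.mpr ⟨kw, hkw, rfl⟩
  unfold PySem.Set.contains
  simp only [List.contains_eq_mem]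
  rcases Bool.eq_false_or_eq_true (PySem.Str.isIn kl pl) with hin | hin
  all_goals rw [hin]
  · -- an infix: it is in the index
    rw [decide_eq_true_eq]
    rw [PySem.Str.isIn_iff_infix, ← window_iff_infix] at hin
    rcases hin with ⟨i, hi0, hilt, hkweq⟩
    rw [mem_foldl_foldl_set_add]
    refine Or.inr ⟨PySem.Str.len kl, hmemL, i, ?_, ?_⟩
    · rw [PySem.List.mem_pyRange_one]
      refine ⟨hi0, ?_⟩
      rw [PySem.Str.len_eq, PySem.Str.len_eq]
      exact_mod_cast hilt
    · apply String.toList_inj.mp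
      simp only [PySem.Str.toList_slice, PySem.Chars.slice_eq_listSlice]
      rw [PySem.Str.len_eq]
      exact hkweq
  · -- not an infix: not in the index
    rw [decide_eq_false_iff_not]
    intro hmem
    rw [mem_foldl_foldl_set_add] at hmem
    rcases hmem with h | ⟨m, hm, i, hi, hy⟩
    · simp [PySem.Set.empty] at h
    · rw [PySem.List.mem_pyRange_one] at hi
      have hm0 : 0 ≤ m := by
        rw [PySem.Set.mem_ofList] at hm
        rcases List.mem_map.mp hm with ⟨k, -, rfl⟩
        rw [PySem.Str.len_eq]
        exact Int.natCast_nonneg _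
      have hn : PySem.Str.len pl = (pl.toList.length : Int) := PySem.Str.len_eq pl
      have hlen : m = PySem.Str.len kl := by
        have := congrArg (fun s : String => (s.toList.length : Int)) hy
        simp only [PySem.Str.toList_slice, PySem.Chars.slice_eq_listSlice] at this
        rw [PySem.List.slice_toNat _ hi.1 (by omega)] at this
        simp only [List.length_take, List.length_drop] at this
        rw [PySem.Str.len_eq]
        omega
      have hinf : kl.toList <:+: pl.toList := by
        rw [← window_iff_infix]
        refine ⟨i, hi.1, ?_, ?_⟩
        · have h2 := hi.2
          rw [hlen, PySem.Str.len_eq, PySem.Str.len_eq] at h2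
          exact_mod_cast h2
        · have h3 := congrArg String.toList hy
          simp only [PySem.Str.toList_slice, PySem.Chars.slice_eq_listSlice] at h3
          rw [hlen, PySem.Str.len_eq] at h3
          exact h3
      have htrue := (PySem.Str.isIn_iff_infix kl pl).mpr hinf
      rw [hin] at htrue
      exact Bool.false_ne_true htrue

-- ===== VERDICT (by name: the statement is the Claim_ definition above) =====
theorem parse_prompt_keywords_spec : Claim_equal_parse_prompt_keywords := by
  intro prompt keyword_list _
  unfold Spec_parse_prompt_keywords parse_prompt_keywords parse_prompt_keywords_alt
  by_cases hguard : prompt.toList = [] ∨ keyword_list = []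
  · rw [if_pos hguard, if_pos hguard]
  · rw [if_neg hguard, if_neg hguard]
    rw [PySem.List.foldl_append_if_eq_filter]
    rw [List.nil_append]
    exact List.filter_congr (fun kw hkw => (contains_eq_isIn prompt keyword_list kw hkw).symm)
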